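-- pv_equiv track=rewrite | github.com/Tragoedie/on_server_learning | SumOfThe.py | SumOfThe
-- ===== SOURCE A (Python) =====
-- def SumOfThe(N, data):
--     count = 0
--     data_work = data.copy()
--     while count < N:
--         summ = 0
--         for j in range(1, N):
--             summ += data_work[j]
--         if data_work[0] == summ:
--             return data_work[0]
--         else:
--             count += 1
--             data_work[0], data_work[count] = data_work[count], data_work[0]
-- ===== SOURCE B (Python) =====
-- def SumOfThe(N, data):
--     # B: compute the prefix total once, then return the first x in data[:N]
--     # with 2*x == total (x equals the sum of the other N-1 elements). O(N) vs A's O(N^2).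
--     if N <= 0:
--         return None
--     prefix = data[:N]
--     total = sum(prefix)
--     for x in prefix:
--         if 2 * x == total:
--             return x
--     return None
-- ===== Notes on version B (the rewrite author's own statement) =====
-- stated objective: faster
-- what changed: Instead of A's N passes each re-summing N-1 elements of a swapped working list, B computes the prefix total once and scans data[:N] for the first x with 2*x == total.
import Mathlib
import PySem

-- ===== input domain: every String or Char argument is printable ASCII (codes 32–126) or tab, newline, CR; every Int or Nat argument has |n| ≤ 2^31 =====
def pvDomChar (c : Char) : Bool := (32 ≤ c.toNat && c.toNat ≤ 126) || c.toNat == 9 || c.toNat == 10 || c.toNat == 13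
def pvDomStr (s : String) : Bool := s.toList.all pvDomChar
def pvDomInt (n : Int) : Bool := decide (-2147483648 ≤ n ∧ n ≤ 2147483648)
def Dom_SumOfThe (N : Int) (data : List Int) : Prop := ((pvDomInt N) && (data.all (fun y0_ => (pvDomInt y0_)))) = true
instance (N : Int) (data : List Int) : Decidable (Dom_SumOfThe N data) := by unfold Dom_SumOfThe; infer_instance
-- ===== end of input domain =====

-- B computes the prefix total once and scans for the first x with 2*x == total (O(N) vs A's O(N^2)).


-- ===== PORT A =====
-- summ = 0; for j in range(1, N): summ += data_work[j]   (none = IndexError)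
def SumOfTheSum (dw : List Int) (N : Int) : Option Int :=
  (PySem.List.pyRange 1 N 1).foldl
    (fun acc j => acc.bind fun s => (PySem.List.pyGet? dw j).map (fun v => s + v)) (some 0)

-- the while-loop; fuel = (N - count).toNat iterations remain; none = fell out of the loop
-- (Python returns None) or an IndexError (excluded by Pre_SumOfThe)
def SumOfTheLoop : Nat → Int → Int → List Int → Option Int
  | 0, _, _, _ => none
  | fuel + 1, N, count, dw =>
    match SumOfTheSum dw N with
    | none => none
    | some summ =>
      match PySem.List.pyGet? dw 0 with
      | none => none
      | some d0 =>
        if d0 = summ then some d0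
        else
          match PySem.List.pyGet? dw (count + 1) with
          | none => none
          | some dc =>
            -- data_work[0], data_work[count] = data_work[count], data_work[0]
            SumOfTheLoop fuel N (count + 1) ((dw.set 0 dc).set (count + 1).toNat d0)

def SumOfThe (N : Int) (data : List Int) : Option Int :=
  SumOfTheLoop N.toNat N 0 data

-- ===== PORT B =====
-- for x in prefix: if 2*x == total: return x
def SumOfTheFind : List Int → Int → Option Int
  | [], _ => none
  | x :: xs, total => if 2 * x = total then some x else SumOfTheFind xs total

def SumOfThe_alt (N : Int) (data : List Int) : Option Int :=
  if N ≤ 0 then none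
  else
    let pref := PySem.List.slice data none (some N)
    SumOfTheFind pref pref.sum

-- ===== PRECONDITION & SPEC =====
-- Pre_ excludes exactly the inputs on which A raises IndexError: 0 < N with N > len(data),
-- or N == len(data) when no element of data[:N] equals the sum of the other N-1 (the final swap reads data[N]).
def Pre_SumOfThe (N : Int) (data : List Int) : Prop :=
  N ≤ 0 ∨ (N ≤ data.length ∧
    (N < data.length ∨ ∃ x ∈ data.take N.toNat, 2 * x = (data.take N.toNat).sum))
instance (N : Int) (data : List Int) : Decidable (Pre_SumOfThe N data) := by
  unfold Pre_SumOfThe; infer_instance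

def pvWitness_SumOfThe : Int × List Int := (3, [3, 1, 2])

def Spec_SumOfThe (N : Int) (data : List Int) (out : Option Int) : Prop := out = SumOfThe_alt N data
instance (N : Int) (data : List Int) (out : Option Int) : Decidable (Spec_SumOfThe N data out) := by unfold Spec_SumOfThe; infer_instance

-- ===== CLAIM (what is proved, stated in full; the proofs are below) =====
def Claim_equal_SumOfThe : Prop := ∀ (N : Int) (data : List Int), Dom_SumOfThe N data → Pre_SumOfThe N data → Spec_SumOfThe N data (SumOfThe N data)

-- ===== LEMMAS AND PROOFS =====

theorem sum_aux (dw : List Int) : ∀ (m : Nat), 1 + m ≤ dw.length →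
    SumOfTheSum dw (1 + (m : Int)) = some ((dw.drop 1).take m).sum := by
  intro m
  induction m with
  | zero => intro _; simp [SumOfTheSum, PySem.List.pyRange_one_eq_nil]
  | succ m ih =>
    intro h
    unfold SumOfTheSum at *
    rw [show (1 + ((m + 1 : Nat) : Int)) = (1 + (m : Int)) + 1 by push_cast; ring,
        PySem.List.pyRange_one_succ_right (by omega), List.foldl_append, ih (by omega)]
    have hg : PySem.List.pyGet? dw (1 + (m : Int)) = some dw[1 + m] := by
      have := PySem.List.pyGet?_ofNat dw (1 + m) (by omega)
      push_cast at this
      exact this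
    simp only [List.foldl, hg, Option.bind, Option.map]
    rw [List.sum_take_succ _ m (by simp; omega)]
    simp
    congr 1
    omega

theorem sum_eq (dw : List Int) (N : Int) (hN : 0 < N) (hlen : N ≤ dw.length) :
    SumOfTheSum dw N = some ((dw.drop 1).take (N.toNat - 1)).sum := by
  have hm : N = 1 + ((N.toNat - 1 : Nat) : Int) := by omega
  have h := sum_aux dw (N.toNat - 1) (by omega)
  rw [← hm] at h
  exact h

theorem loop_eq (data : List Int) (N : Int) (hN : 0 < N) (hlen : N ≤ data.length) :
    ∀ (fuel c : Nat), c + fuel = N.toNat →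
      (N < data.length ∨ ∃ x ∈ (data.take N.toNat).drop c, 2 * x = (data.take N.toNat).sum) →
      SumOfTheLoop fuel N (c : Int) (data[c]! :: (data.take c ++ data.drop (c + 1))) =
        SumOfTheFind ((data.take N.toNat).drop c) (data.take N.toNat).sum := by
  intro fuel
  induction fuel with
  | zero =>
    intro c hc _
    have : (data.take N.toNat).drop c = [] :=
      List.drop_eq_nil_of_le (by simp; omega)
    simp [SumOfTheLoop, this, SumOfTheFind]
  | succ fuel ih =>
    intro c hc hsafe
    set n := N.toNat with hn
    have hcn : c < n := by omega
    have hnl : n ≤ data.length := by omega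
    have hcl : c < data.length := by omega
    set dw := data[c]! :: (data.take c ++ data.drop (c + 1)) with hdw
    have hdwlen : dw.length = data.length := by
      simp [hdw]; omega
    -- the inner sum
    have hsum : SumOfTheSum dw N = some ((data.take n).sum - data[c]) := by
      rw [sum_eq dw N hN (by omega)]
      congr 1
      have hdrop : dw.drop 1 = data.take c ++ data.drop (c + 1) := by simp [hdw]
      have htk : (dw.drop 1).take (n - 1) =
          data.take c ++ (data.drop (c + 1)).take (n - 1 - c) := by
        rw [hdrop, List.take_append, List.take_of_length_le (by simp; omega)]
        congr 2
        simp
        omega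
      have hT : data.take n = data.take c ++ (data[c] :: (data.drop (c + 1)).take (n - c - 1)) := by
        conv_lhs => rw [show n = c + (n - c) by omega]
        rw [List.take_add, List.drop_eq_getElem_cons hcl,
            show n - c = (n - c - 1) + 1 by omega, List.take_succ_cons]
        simp
      rw [htk, hT]
      simp [List.sum_append]
      rw [show n - 1 - c = n - c - 1 by omega]
      ring
    -- head of dw
    have hd0 : PySem.List.pyGet? dw 0 = some data[c]! := by
      have h := PySem.List.pyGet?_ofNat dw 0 (by simp [hdw])
      push_cast at h
      rw [h]
      congr 1
    have hget : data[c]! = data[c] := getElem!_pos data c hcl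
    -- RHS head
    have hrhs : (data.take n).drop c = data[c] :: (data.take n).drop (c + 1) := by
      rw [List.drop_eq_getElem_cons (by simp; omega), List.getElem_take]
    simp only [SumOfTheLoop, hsum, hd0]
    by_cases hmatch : 2 * data[c] = (data.take n).sum
    · rw [if_pos (show data[c]! = (data.take n).sum - data[c] by rw [hget]; omega), hrhs]
      simp [SumOfTheFind, hmatch, hget]
    · have hne : ¬ (data[c]! = (data.take n).sum - data[c]) := by rw [hget]; omega
      rw [if_neg hne]
      -- need c + 1 < data.length
      have hlt : c + 1 < data.length := by
        by_contra hge
        have h2 : n = data.length := by omega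
        rcases hsafe with h | ⟨x, hx, hxe⟩
        · omega
        · rw [hrhs] at hx
          rcases List.mem_cons.mp hx with rfl | hx'
          · exact hmatch hxe
          · have : (data.take n).drop (c + 1) = [] := List.drop_eq_nil_of_le (by simp; omega)
            rw [this] at hx'
            exact absurd hx' (List.not_mem_nil)
      have hdc : PySem.List.pyGet? dw ((c : Int) + 1) = some data[c + 1] := by
        have h1 := PySem.List.pyGet?_ofNat dw (c + 1) (by omega)
        push_cast at h1
        have h2 : dw[c + 1]'(by omega) = data[c + 1] := by
          show (data[c]! :: (data.take c ++ data.drop (c + 1)))[c + 1]'(by rw [← hdw]; omega)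
              = data[c + 1]
          rw [List.getElem_cons_succ, List.getElem_append_right (by simp)]
          simp [List.getElem_drop]
          congr 1
          omega
        exact h1.trans (congrArg some h2)
      simp only [hdc]
      show SumOfTheLoop fuel N ((c : Int) + 1)
          ((dw.set 0 data[c + 1]).set ((c : Int) + 1).toNat data[c]!) = _
      -- the swapped list is the loop state for count = c + 1
      have hswap : (dw.set 0 data[c + 1]).set ((c : Int) + 1).toNat data[c]! =
          data[c + 1]! :: (data.take (c + 1) ++ data.drop (c + 2)) := by
        rw [show ((c : Int) + 1).toNat = c + 1 from by omega, hdw,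
            getElem!_pos data (c + 1) hlt, getElem!_pos data c hcl]
        simp only [List.set_cons_zero, List.set_cons_succ]
        rw [List.set_append, if_neg (by simp)]
        simp only [List.length_take]
        rw [show c - min c data.length = 0 from by omega,
            List.drop_eq_getElem_cons hlt, List.set_cons_zero,
            show c + 2 = c + 1 + 1 from rfl]
        conv_rhs => rw [← List.take_concat_get hcl]
        rw [List.concat_eq_append, List.append_assoc]
        rfl
      rw [hswap]
      have hIH := ih (c + 1) (by omega) ?_
      · push_cast at hIH ⊢
        rw [hIH, hrhs]
        simp [SumOfTheFind, hmatch]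
      · rcases hsafe with h | ⟨x, hx, hxe⟩
        · exact Or.inl h
        · right
          rw [hrhs] at hx
          rcases List.mem_cons.mp hx with rfl | hx'
          · exact absurd hxe hmatch
          · exact ⟨x, hx', hxe⟩

-- ===== VERDICT (by name: the statement is the Claim_ definition above) =====
theorem SumOfThe_spec : Claim_equal_SumOfThe := by
  intro N data _ hpre
  unfold Spec_SumOfThe SumOfThe SumOfThe_alt
  by_cases hN0 : N ≤ 0
  · rw [if_pos hN0, show N.toNat = 0 from by omega]
    rfl
  · have hN : 0 < N := by omega
    rcases hpre with h0 | ⟨hlen, hsafe⟩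
    · omega
    · have h0l : 0 < data.length := by omega
      rw [if_neg hN0]
      show SumOfTheLoop N.toNat N 0 data =
        SumOfTheFind (PySem.List.slice data none (some N)) (PySem.List.slice data none (some N)).sum
      rw [PySem.List.slice_to data (show (0:Int) ≤ N by omega)]
      have hdata : data = data[0]! :: (data.take 0 ++ data.drop 1) := by
        rw [getElem!_pos data 0 h0l, List.take_zero, List.nil_append]
        conv_lhs => rw [← List.drop_zero (l := data), List.drop_eq_getElem_cons h0l]
      conv_lhs => rw [hdata]
      have h := loop_eq data N hN hlen N.toNat 0 (by omega) (by simpa using hsafe)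
      rw [show ((0 : Nat) : Int) = 0 from rfl] at h
      rw [h, List.drop_zero]
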